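-- pv_equiv track=rewrite | github.com/Muzzle-kr/AlgorithmAutoSave | 프로그래머스/1/1845. 폰켓몬/폰켓몬.py | solution
-- ===== SOURCE A (Python) =====
-- def solution(nums):
--     dict = {}
--
--     for n in nums:
--         dict[n] = 1
--
--     if len(dict) > len(nums) // 2:
--         return len(nums) // 2
--     else:
--         return len(dict)
-- ===== SOURCE B (Python) =====
-- def solution(nums):
--     s = sorted(nums)
--     if not s:
--         distinct = 0
--     else:
--         distinct = 1 + sum(1 for a, b in zip(s, s[1:]) if a != b)
--     return min(distinct, len(nums) // 2)
-- ===== Notes on version B (the rewrite author's own statement) =====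
-- stated objective: alternative
-- what changed: Replaces the hash-table (dict) distinct-count plus an if/else cap with sort-then-scan: sort the list, count adjacent value changes to get the distinct count, and cap it with min(); no dict at all.
import Mathlib
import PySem

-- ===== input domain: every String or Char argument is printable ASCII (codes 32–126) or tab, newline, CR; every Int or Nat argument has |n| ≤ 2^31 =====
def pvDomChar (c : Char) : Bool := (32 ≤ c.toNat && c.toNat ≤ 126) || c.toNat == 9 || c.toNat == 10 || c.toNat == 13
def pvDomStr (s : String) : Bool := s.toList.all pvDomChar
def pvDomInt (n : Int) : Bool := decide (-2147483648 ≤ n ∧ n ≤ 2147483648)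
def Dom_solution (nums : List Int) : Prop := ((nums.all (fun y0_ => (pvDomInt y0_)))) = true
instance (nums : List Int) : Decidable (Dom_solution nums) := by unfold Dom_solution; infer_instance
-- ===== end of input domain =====

-- B replaces A's dict-based distinct count and if/else cap by sort-then-scan:
-- count adjacent value changes in the sorted list, then cap with min (alternative decomposition).

-- ===== PORT A =====
def solution (nums : List Int) : Int :=
  let d : PySem.Dict Int Int := nums.foldl (fun d n => d.insert n 1) PySem.Dict.empty
  if (d.size : Int) > PySem.Int.floordiv (nums.length : Int) 2 then
    PySem.Int.floordiv (nums.length : Int) 2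
  else
    (d.size : Int)

-- ===== PORT B =====
def solution_alt (nums : List Int) : Int :=
  let s := PySem.List.sorted nums (fun x => x) false
  let distinct : Int :=
    if s = [] then 0
    else 1 + (s.zip (PySem.List.slice s (some 1) none)).foldl
      (fun c p => if p.1 ≠ p.2 then c + 1 else c) 0
  min distinct (PySem.Int.floordiv (nums.length : Int) 2)

-- ===== PRECONDITION & SPEC =====
def Spec_solution (nums : List Int) (out : Int) : Prop := out = solution_alt nums
instance (nums : List Int) (out : Int) : Decidable (Spec_solution nums out) := by unfold Spec_solution; infer_instance

-- ===== CLAIM (what is proved, stated in full; the proofs are below) =====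
def Claim_equal_solution : Prop := ∀ (nums : List Int), Dom_solution nums → Spec_solution nums (solution nums)

-- ===== LEMMAS AND PROOFS =====

-- On a weakly increasing list, 1 + the number of adjacent changes is the number of distinct values.
lemma changes_sorted (l : List Int) (hp : l.Pairwise (· ≤ ·)) :
    (if l = [] then (0 : Int)
     else 1 + (l.zip l.tail).foldl (fun c p => if p.1 ≠ p.2 then c + 1 else c) 0)
    = (l.toFinset.card : Int) := by
  induction l with
  | nil => simp
  | cons x t ih =>
    cases t with
    | nil => simp
    | cons y t' =>
      have hp' : (y :: t').Pairwise (· ≤ ·) := hp.tail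
      have ihy := ih hp'
      simp only [if_neg, reduceCtorEq, not_false_iff] at ihy ⊢
      have hzip : ((x :: y :: t').zip (y :: t')) = (x, y) :: ((y :: t').zip t') := rfl
      rw [List.tail_cons] at *
      rw [hzip, List.foldl_cons]
      have hshift : ∀ (a : Int), ((y :: t').zip t').foldl
          (fun c p => if p.1 ≠ p.2 then c + 1 else c) a
          = a + ((y :: t').zip t').foldl (fun c p => if p.1 ≠ p.2 then c + 1 else c) 0 := by
        intro a
        induction ((y :: t').zip t') generalizing a with
        | nil => simp
        | cons q r ihr =>
          simp only [List.foldl_cons]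
          by_cases hq : q.1 ≠ q.2
          · rw [if_pos hq, if_pos hq, ihr (a + 1), ihr (0 + 1)]; ring
          · rw [if_neg hq, if_neg hq, ihr a]
      by_cases hxy : x = y
      · subst hxy
        have : x ∈ (x :: t').toFinset := by simp
        rw [List.toFinset_cons, Finset.insert_eq_self.2 this]
        simp only [ne_eq, not_true_eq_false, if_neg]
        rw [if_neg (by simp)]
        exact ihy
      · have hxt : x ∉ t' := by
          intro hmem
          have hyx : y ≤ x := by
            rcases hp' with _ | ⟨hy, _⟩
            exact hy x hmem
          have hxy' : x ≤ y := by
            rcases hp with _ | ⟨hx, _⟩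
            exact hx y (by simp)
          exact hxy (le_antisymm hxy' hyx)
        have hnotin : x ∉ (y :: t').toFinset := by
          simp [hxy, hxt]
        rw [List.toFinset_cons, Finset.card_insert_of_notMem hnotin]
        rw [if_pos (by simpa using hxy)]
        rw [hshift (0 + 1)]
        push_cast
        omega

-- A's dict size is the number of distinct elements.
lemma sizeA_eq (nums : List Int) :
    ((nums.foldl (fun d n => d.insert n (1 : Int)) PySem.Dict.empty).size : Int)
      = (nums.toFinset.card : Int) := by
  have hkeys : (nums.foldl (fun d n => d.insert n (1 : Int)) PySem.Dict.empty).keys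
      = PySem.Set.update (PySem.Dict.empty : PySem.Dict Int Int).keys nums :=
    PySem.Dict.keys_foldl_insert nums (fun _ _ => 1) PySem.Dict.empty
  have hsz : (nums.foldl (fun d n => d.insert n (1 : Int)) PySem.Dict.empty).size
      = (nums.foldl (fun d n => d.insert n (1 : Int)) PySem.Dict.empty).keys.length := by
    simp [PySem.Dict.size, PySem.Dict.keys]
  have hupd : PySem.Set.update (PySem.Dict.empty : PySem.Dict Int Int).keys nums
      = PySem.Set.ofList nums := by
    simp [PySem.Dict.keys_empty, PySem.Set.update_nil_left]
  have hnodup : (PySem.Set.ofList nums).Nodup := PySem.Set.nodup_ofList nums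
  have hfs : (PySem.Set.ofList nums).toFinset = nums.toFinset := by
    ext a; simp [PySem.Set.mem_ofList]
  rw [hsz, hkeys, hupd]
  rw [← List.toFinset_card_of_nodup hnodup, hfs]

-- ===== VERDICT (by name: the statement is the Claim_ definition above) =====
theorem solution_spec : Claim_equal_solution := by
  intro nums _
  unfold Spec_solution solution solution_alt
  simp only []
  have hperm : (PySem.List.sorted nums (fun x => x) false).Perm nums :=
    PySem.List.sorted_perm nums (fun x => x) false
  have hpw : (PySem.List.sorted nums (fun x => x) false).Pairwise (· ≤ ·) := by
    simpa using PySem.List.sorted_pairwise nums (fun x => x)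
  rw [PySem.List.slice_from_one]
  rw [changes_sorted _ hpw, List.toFinset_eq_of_perm _ _ hperm, sizeA_eq]
  set s : Int := (nums.toFinset.card : Int)
  set h : Int := PySem.Int.floordiv (nums.length : Int) 2
  by_cases hc : s > h
  · rw [if_pos hc]; omega
  · rw [if_neg hc]; omega
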